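-- pv_equiv track=rewrite | github.com/eimearc/rendering | Cube.py | CreateFaceLoop
-- ===== SOURCE A (Python) =====
-- def CreateFaceLoop(startindex=0):
-- 	faces = [
-- 		0,4,5,1,
-- 		1,5,6,2,
-- 		2,6,7,3,
-- 		3,7,4,0
-- 	]
-- 	faces = [i+(startindex*4) for i in faces]
-- 	return faces
-- ===== SOURCE B (Python) =====
-- def CreateFaceLoop(startindex=0):
-- 	off = startindex*4
-- 	faces = []
-- 	for i in range(4):
-- 		j = (i+1) % 4
-- 		faces.extend([i+off, i+4+off, j+4+off, j+off])
-- 	return faces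
-- ===== Notes on version B (the rewrite author's own statement) =====
-- stated objective: alternative
-- what changed: Replaces the hardcoded 16-element index table with a loop over the 4 side faces that computes each quad as [i, i+4, (i+1)%4+4, (i+1)%4] and applies the offset once per element.
import Mathlib
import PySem

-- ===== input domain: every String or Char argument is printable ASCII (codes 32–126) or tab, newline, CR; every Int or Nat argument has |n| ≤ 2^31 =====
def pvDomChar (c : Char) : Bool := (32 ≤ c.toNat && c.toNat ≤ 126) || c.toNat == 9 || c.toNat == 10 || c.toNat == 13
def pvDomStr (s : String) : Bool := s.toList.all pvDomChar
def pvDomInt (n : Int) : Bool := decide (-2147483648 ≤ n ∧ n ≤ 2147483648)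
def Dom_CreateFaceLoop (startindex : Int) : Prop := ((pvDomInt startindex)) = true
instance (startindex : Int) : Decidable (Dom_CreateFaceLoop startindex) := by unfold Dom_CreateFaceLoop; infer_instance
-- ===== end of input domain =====

-- B replaces A's hardcoded 16-entry face-index table with a loop that computes each quad; alternative decomposition, same cost.


-- ===== PORT A =====
-- port of A: literal table, then list comprehension adding startindex*4
def CreateFaceLoop (startindex : Int) : List Int :=
  let faces : List Int := [0,4,5,1, 1,5,6,2, 2,6,7,3, 3,7,4,0]
  faces.map (fun i => i + startindex * 4)

-- ===== PORT B =====
-- port of B: loop over range(4), extending with the computed quad each iteration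
def CreateFaceLoop_alt (startindex : Int) : List Int :=
  let off := startindex * 4
  (PySem.List.pyRange 0 4 1).foldl (fun (faces : List Int) i =>
    let j := PySem.Int.mod (i + 1) 4
    faces ++ [i + off, i + 4 + off, j + 4 + off, j + off]) []

-- ===== PRECONDITION & SPEC =====
def Spec_CreateFaceLoop (startindex : Int) (out : List Int) : Prop := out = CreateFaceLoop_alt startindex
instance (startindex : Int) (out : List Int) : Decidable (Spec_CreateFaceLoop startindex out) := by unfold Spec_CreateFaceLoop; infer_instance

-- ===== CLAIM (what is proved, stated in full; the proofs are below) =====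
def Claim_equal_CreateFaceLoop : Prop := ∀ (startindex : Int), Dom_CreateFaceLoop startindex → Spec_CreateFaceLoop startindex (CreateFaceLoop startindex)

-- ===== LEMMAS AND PROOFS =====

-- ===== VERDICT (by name: the statement is the Claim_ definition above) =====
theorem CreateFaceLoop_spec : Claim_equal_CreateFaceLoop := by
  intro s _
  unfold Spec_CreateFaceLoop CreateFaceLoop CreateFaceLoop_alt
  simp [PySem.List.pyRange, PySem.Int.mod, List.range_succ]
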